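-- pv_equiv track=rewrite | github.com/NicovincX2/Python-3.5 | Algorithmique/Algorithme/Algorithme de compression/Algorithme de compression sans perte/lz77.py | find_max_repetition
-- ===== SOURCE A (Python) =====
-- def find_max_repetition(text, index, window_length=2**12-1, max_rep_length=2**5-1):
--     """ finds a maximum repetition in the text.
--     Returns offset and length of the longest repetition.
--     Returned offset is smallest one (closest to index) among all max matches"""
--     assert isinstance(text, str)
--     repitition_length = 0 # length of max repitition
--     repitition_offset = 0 # distance backwards to begining of max repitition
--     for offset in range(1, min(index + 1, window_length)):
--         current_length = 0
--         while current_length < min(max_rep_length, len(text) - index) and text[index - offset + current_length] == text[index + current_length]: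
--             current_length += + 1
--         if repitition_length < current_length:
--             repitition_length = current_length
--             repitition_offset = offset
--     return repitition_offset, repitition_length
-- ===== SOURCE B (Python) =====
-- def find_max_repetition(text, index, window_length=2**12-1, max_rep_length=2**5-1):
--     """Column-wise sieve: instead of measuring each candidate offset's match
--     length one offset at a time, advance one match position k at a time,
--     filtering the set of offsets that still match; the answer is the number of
--     columns survived and the smallest offset in the last nonempty survivor set."""
--     assert isinstance(text, str)
--     cap = min(max_rep_length, len(text) - index)
--     alive = list(range(1, min(index + 1, window_length)))
--     best_offset, best_length = 0, 0
--     k = 0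
--     while k < cap:
--         alive = [o for o in alive if text[index - o + k] == text[index + k]]
--         if not alive:
--             break
--         k += 1
--         best_offset, best_length = alive[0], k
--     return best_offset, best_length
-- ===== Notes on version B (the rewrite author's own statement) =====
-- stated objective: alternative
-- what changed: B transposes the two loops: instead of measuring each offset's match length separately, it advances one match position at a time while filtering a shrinking list of surviving offsets (a column-wise sieve), taking the smallest survivor of the last nonempty round; same worst-case cost, but it stops as soon as no offset survives.
import Mathlib
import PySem

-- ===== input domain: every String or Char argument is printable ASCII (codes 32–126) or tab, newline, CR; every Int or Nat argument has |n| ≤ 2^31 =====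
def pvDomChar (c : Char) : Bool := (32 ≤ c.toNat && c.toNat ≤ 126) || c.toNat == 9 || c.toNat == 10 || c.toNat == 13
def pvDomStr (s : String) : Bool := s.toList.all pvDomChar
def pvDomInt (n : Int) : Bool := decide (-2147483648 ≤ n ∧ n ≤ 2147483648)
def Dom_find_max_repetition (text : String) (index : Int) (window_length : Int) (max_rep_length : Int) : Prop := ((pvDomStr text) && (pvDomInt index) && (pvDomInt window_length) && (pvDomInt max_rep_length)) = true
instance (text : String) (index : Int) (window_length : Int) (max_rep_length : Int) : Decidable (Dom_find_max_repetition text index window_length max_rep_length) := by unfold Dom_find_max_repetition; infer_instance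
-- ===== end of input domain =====

-- B transposes A's loops: A measures each offset's match length in turn; B advances one match
-- position at a time, filtering a shrinking list of surviving offsets (objective: alternative).

-- ===== PORT A =====
-- A's inner 'while': advance current_length while below the bound and the two characters match
-- (text[...] ported as Str.pyGet?; inside A's loop both indices are always in range).
def pvAWhile (text : String) (index offset bound cl : Int) : Int :=
  if h : cl < bound ∧ (PySem.Str.pyGet? text (index - offset + cl)).isSome ∧
      PySem.Str.pyGet? text (index - offset + cl) = PySem.Str.pyGet? text (index + cl) then
    pvAWhile text index offset bound (cl + 1)
  else cl
termination_by (bound - cl).toNat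
decreasing_by omega

def find_max_repetition (text : String) (index : Int) (window_length : Int) (max_rep_length : Int) : List Int :=
  -- state (repitition_length, repitition_offset), initially (0, 0)
  let st := (PySem.List.pyRange 1 (min (index + 1) window_length) 1).foldl
    (fun (st : Int × Int) offset =>
      let current := pvAWhile text index offset (min max_rep_length (PySem.Str.len text - index)) 0
      if st.1 < current then (current, offset) else st) (0, 0)
  [st.2, st.1]

-- ===== PORT B =====
-- B's 'while k < cap' loop over the state (alive, k, best_offset, best_length)
def pvBLoop (text : String) (index cap : Int) (alive : List Int) (k bo bl : Int) : Int × Int :=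
  if h : k < cap then
    match alive.filter (fun o =>
        PySem.Str.pyGet? text (index - o + k) == PySem.Str.pyGet? text (index + k)) with
    | [] => (bo, bl)
    | a :: rest => pvBLoop text index cap (a :: rest) (k + 1) a (k + 1)
  else (bo, bl)
termination_by (cap - k).toNat
decreasing_by omega

def find_max_repetition_alt (text : String) (index : Int) (window_length : Int) (max_rep_length : Int) : List Int :=
  let cap := min max_rep_length (PySem.Str.len text - index)
  let alive := PySem.List.pyRange 1 (min (index + 1) window_length) 1
  let st := pvBLoop text index cap alive 0 0 0
  [st.1, st.2]

-- ===== PRECONDITION & SPEC =====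
def Spec_find_max_repetition (text : String) (index : Int) (window_length : Int) (max_rep_length : Int) (out : List Int) : Prop := out = find_max_repetition_alt text index window_length max_rep_length
instance (text : String) (index : Int) (window_length : Int) (max_rep_length : Int) (out : List Int) : Decidable (Spec_find_max_repetition text index window_length max_rep_length out) := by unfold Spec_find_max_repetition; infer_instance

-- ===== CLAIM (what is proved, stated in full; the proofs are below) =====
def Claim_equal_find_max_repetition : Prop := ∀ (text : String) (index : Int) (window_length : Int) (max_rep_length : Int), Dom_find_max_repetition text index window_length max_rep_length → Spec_find_max_repetition text index window_length max_rep_length (find_max_repetition text index window_length max_rep_length)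

-- ===== LEMMAS AND PROOFS =====

-- the match length A computes for offset o
def pvL (text : String) (index cap o : Int) : Int := pvAWhile text index o cap 0

-- maximum of L over a list of offsets, floored at 0
def pvMax (L : Int → Int) (R : List Int) : Int := R.foldr (fun o m => max (L o) m) 0

theorem pvMax_nonneg (L : Int → Int) (R : List Int) : 0 ≤ pvMax L R := by
  induction R with
  | nil => simp [pvMax]
  | cons x t ih => simp only [pvMax, List.foldr_cons] at *; omega

theorem pvMax_le (L : Int → Int) (R : List Int) (c : Int) (hc : 0 ≤ c)
    (h : ∀ o ∈ R, L o ≤ c) : pvMax L R ≤ c := by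
  induction R with
  | nil => simpa [pvMax]
  | cons x t ih =>
    have := h x List.mem_cons_self
    have := ih (fun o ho => h o (List.mem_cons_of_mem _ ho))
    simp only [pvMax, List.foldr_cons] at *; omega

theorem pvMax_ge (L : Int → Int) (R : List Int) (o : Int) (ho : o ∈ R) : L o ≤ pvMax L R := by
  induction R with
  | nil => cases ho
  | cons x t ih =>
    rcases List.mem_cons.mp ho with h | h
    · subst h; simp only [pvMax, List.foldr_cons]; omega
    · have := ih h; simp only [pvMax, List.foldr_cons] at *; omega

theorem pvMax_attained (L : Int → Int) (R : List Int) (h : 0 < pvMax L R) :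
    ∃ o ∈ R, L o = pvMax L R := by
  induction R with
  | nil => simp [pvMax] at h
  | cons x t ih =>
    simp only [pvMax, List.foldr_cons] at h ⊢
    rcases le_total (t.foldr (fun o m => max (L o) m) 0) (L x) with hle | hle
    · exact ⟨x, List.mem_cons_self, (max_eq_left hle).symm⟩
    · have hpos : 0 < pvMax L t := by simp only [pvMax]; omega
      obtain ⟨o, ho, heq⟩ := ih hpos
      exact ⟨o, List.mem_cons_of_mem _ ho, by simp only [pvMax] at heq; omega⟩

-- find? is the head of the filtered list
theorem find?_eq_head?_filter {α : Type} (p : α → Bool) (l : List α) :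
    l.find? p = (l.filter p).head? := by
  induction l with
  | nil => rfl
  | cons x t ih =>
    by_cases h : p x
    · rw [List.find?_cons_of_pos h, List.filter_cons_of_pos h, List.head?_cons]
    · rw [List.find?_cons_of_neg h, List.filter_cons_of_neg h, ih]

-- A's while-loop result is at least its starting counter
theorem pvAWhile_le (text : String) (index offset bound : Int) :
    ∀ cl, cl ≤ pvAWhile text index offset bound cl := by
  intro cl
  fun_induction pvAWhile with
  | case1 h ih => omega
  | case2 => omega

-- ... and at most max cl bound
theorem pvAWhile_le_bound (text : String) (index offset bound : Int) :
    ∀ cl, pvAWhile text index offset bound cl ≤ max cl bound := by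
  intro cl
  fun_induction pvAWhile with
  | case1 h ih => omega
  | case2 => omega

-- characterization of the while loop: every position below the result matches, and
-- the result is either the bound or the first mismatch
theorem pvAWhile_char (text : String) (index offset bound : Int) :
    ∀ cl,
      (∀ j, cl ≤ j → j < pvAWhile text index offset bound cl →
        (PySem.Str.pyGet? text (index - offset + j)).isSome ∧
        PySem.Str.pyGet? text (index - offset + j) = PySem.Str.pyGet? text (index + j)) ∧
      (pvAWhile text index offset bound cl < bound →
        ¬ ((PySem.Str.pyGet? text (index - offset + pvAWhile text index offset bound cl)).isSome ∧
           PySem.Str.pyGet? text (index - offset + pvAWhile text index offset bound cl) =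
             PySem.Str.pyGet? text (index + pvAWhile text index offset bound cl))) := by
  intro cl
  fun_induction pvAWhile with
  | case1 cl h ih =>
    refine ⟨?_, ih.2⟩
    intro j hj1 hj2
    rcases eq_or_lt_of_le hj1 with heq | hlt
    · subst heq; exact ⟨h.2.1, h.2.2⟩
    · exact ih.1 j (by omega) hj2
  | case2 cl h =>
    refine ⟨fun j h1 h2 => absurd (lt_of_le_of_lt h1 h2) (lt_irrefl _), fun hlt hc => ?_⟩
    exact h ⟨hlt, hc.1, hc.2⟩

-- L o ≥ k iff k ≤ cap and every position below k matches (requires 0 < cap so the bound is real)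
theorem pvL_ge_iff (text : String) (index cap o : Int) (hcap : 0 < cap) :
    ∀ k : Int, 0 ≤ k →
      (k ≤ pvL text index cap o ↔ k ≤ cap ∧ ∀ j, 0 ≤ j → j < k →
        (PySem.Str.pyGet? text (index - o + j)).isSome ∧
        PySem.Str.pyGet? text (index - o + j) = PySem.Str.pyGet? text (index + j)) := by
  intro k hk
  simp only [pvL]
  have hchar := pvAWhile_char text index o cap 0
  have hle := pvAWhile_le text index o cap 0
  have hub := pvAWhile_le_bound text index o cap 0
  constructor
  · intro h
    refine ⟨by omega, fun j hj1 hj2 => hchar.1 j hj1 (by omega)⟩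
  · rintro ⟨hkc, hall⟩
    by_contra hlt
    push Not at hlt
    exact hchar.2 (by omega) (hall _ (by omega) (by omega))

-- on in-range positions the while-loop condition equals the Bool filter predicate
theorem cond_eq_pB (text : String) (index cap o j : Int)
    (h1 : 1 ≤ o) (h2 : o ≤ index) (hj : 0 ≤ j) (hjc : j < cap)
    (hlen : index + cap ≤ (text.toList.length : Int)) :
    ((PySem.Str.pyGet? text (index - o + j) == PySem.Str.pyGet? text (index + j)) = true) ↔
      ((PySem.Str.pyGet? text (index - o + j)).isSome ∧
       PySem.Str.pyGet? text (index - o + j) = PySem.Str.pyGet? text (index + j)) := by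
  have ha : PySem.Str.pyGet? text (index - o + j)
      = some (text.toList[((index - o + j).toNat)]'(by omega)) := by
    have he : PySem.Str.pyGet? text (index - o + j) = PySem.List.pyGet? text.toList (index - o + j) := by
      simp [PySem.Str.pyGet?]
    rw [he, PySem.List.pyGet?_eq_some_getElem text.toList (by omega) (by omega)]
  have hb : PySem.Str.pyGet? text (index + j)
      = some (text.toList[((index + j).toNat)]'(by omega)) := by
    have he : PySem.Str.pyGet? text (index + j) = PySem.List.pyGet? text.toList (index + j) := by
      simp [PySem.Str.pyGet?]
    rw [he, PySem.List.pyGet?_eq_some_getElem text.toList (by omega) (by omega)]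
  rw [ha, hb]
  simp

-- merging one filter round: for offsets in range, surviving round k of the sieve
-- is exactly having match length at least k+1
theorem filter_step (text : String) (index cap : Int) (R : List Int)
    (hR : ∀ o ∈ R, 1 ≤ o ∧ o ≤ index) (k : Int) (hk : 0 ≤ k) (hkc : k < cap)
    (hlen : index + cap ≤ (text.toList.length : Int)) :
    (R.filter (fun o => decide (k ≤ pvL text index cap o))).filter
        (fun o => PySem.Str.pyGet? text (index - o + k) == PySem.Str.pyGet? text (index + k))
      = R.filter (fun o => decide (k + 1 ≤ pvL text index cap o)) := by
  rw [List.filter_filter]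
  apply List.filter_congr
  intro o ho
  obtain ⟨h1, h2⟩ := hR o ho
  have hiff := pvL_ge_iff text index cap o (by omega)
  have hcond := cond_eq_pB text index cap o k h1 h2 hk hkc hlen
  by_cases hko : k ≤ pvL text index cap o
  · have hmat := (hiff k hk).mp hko
    rw [decide_eq_true hko, Bool.and_true]
    by_cases hp : (PySem.Str.pyGet? text (index - o + k) == PySem.Str.pyGet? text (index + k)) = true
    · have hnext : k + 1 ≤ pvL text index cap o := by
        apply (hiff (k + 1) (by omega)).mpr
        refine ⟨by omega, fun j hj1 hj2 => ?_⟩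
        rcases lt_or_ge j k with hjk | hjk
        · exact hmat.2 j hj1 hjk
        · have hjeq : j = k := by omega
          subst hjeq
          exact hcond.mp hp
      rw [hp, decide_eq_true hnext]
    · have hnot : ¬ (k + 1 ≤ pvL text index cap o) := by
        intro hcon
        have := (hiff (k + 1) (by omega)).mp hcon
        exact hp (hcond.mpr (this.2 k hk (by omega)))
      rw [Bool.eq_false_iff.mpr hp, decide_eq_false hnot]
  · have hnot : ¬ (k + 1 ≤ pvL text index cap o) := by omega
    rw [decide_eq_false hko, Bool.and_false, decide_eq_false hnot]

-- characterization of A's selection fold: result is the max length with the first offset attaining it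
theorem foldA_char (L : Int → Int) :
    ∀ (R : List Int) (bl bo : Int), 0 ≤ bl →
      R.foldl (fun st o => if st.1 < L o then (L o, o) else st) (bl, bo)
        = if bl < pvMax L R then
            (pvMax L R, (R.find? (fun o => decide (pvMax L R ≤ L o))).getD bo)
          else (bl, bo) := by
  intro R
  induction R with
  | nil =>
    intro bl bo hbl
    have : ¬ bl < pvMax L [] := by simp [pvMax]; omega
    simp [this]
  | cons x t ih =>
    intro bl bo hbl
    have hM : pvMax L (x :: t) = max (L x) (pvMax L t) := by simp [pvMax]
    have hMt0 : 0 ≤ pvMax L t := pvMax_nonneg L t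
    simp only [List.foldl_cons]
    by_cases hx : bl < L x
    · rw [if_pos hx, ih (L x) x (by omega)]
      by_cases h2 : L x < pvMax L t
      · rw [if_pos h2]
        have hM' : pvMax L (x :: t) = pvMax L t := by omega
        rw [if_pos (by omega : bl < pvMax L (x :: t)), hM']
        have hfindx : (decide (pvMax L t ≤ L x)) = false := by simp; omega
        rw [List.find?_cons, hfindx]
        obtain ⟨o, ho, heq⟩ := pvMax_attained L t (by omega)
        have : (t.find? (fun o => decide (pvMax L t ≤ L o))).isSome := by
          rw [List.find?_isSome]
          exact ⟨o, ho, by simp [heq]⟩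
        obtain ⟨v, hv⟩ := Option.isSome_iff_exists.mp this
        simp [hv]
      · rw [if_neg h2]
        have hM' : pvMax L (x :: t) = L x := by omega
        rw [if_pos (by omega : bl < pvMax L (x :: t)), hM']
        have hfindx : (decide (L x ≤ L x)) = true := by simp
        rw [List.find?_cons, hfindx]
        simp
    · rw [if_neg hx, ih bl bo hbl]
      by_cases h2 : bl < pvMax L t
      · rw [if_pos h2]
        have hM' : pvMax L (x :: t) = pvMax L t := by omega
        rw [if_pos (by omega : bl < pvMax L (x :: t)), hM']
        have hfindx : (decide (pvMax L t ≤ L x)) = false := by simp; omega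
        rw [List.find?_cons, hfindx]
      · rw [if_neg h2, if_neg (by omega : ¬ bl < pvMax L (x :: t))]

-- the sieve loop, started at any round k with the correct survivor list and best-so-far,
-- returns the max length with the first offset attaining it
theorem pvBLoop_eq (text : String) (index cap : Int) (R : List Int)
    (hcap : 0 < cap) (hlen : index + cap ≤ (text.toList.length : Int))
    (hR : ∀ o ∈ R, 1 ≤ o ∧ o ≤ index) :
    ∀ (n : Nat) (k bo bl : Int), (cap - k).toNat = n → 0 ≤ k → k ≤ cap →
      ((k = 0 ∧ bo = 0 ∧ bl = 0) ∨
       (0 < k ∧ bl = k ∧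
        (R.filter (fun o => decide (k ≤ pvL text index cap o))).head? = some bo)) →
      pvBLoop text index cap (R.filter (fun o => decide (k ≤ pvL text index cap o))) k bo bl
        = (if 0 < pvMax (pvL text index cap) R then
             ((R.find? (fun o => decide (pvMax (pvL text index cap) R ≤ pvL text index cap o))).getD 0,
              pvMax (pvL text index cap) R)
           else (0, 0)) := by
  intro n
  induction n with
  | zero =>
    intro k bo bl hn hk0 hkc hinv
    have hk : k = cap := by omega
    rw [pvBLoop, dif_neg (by omega : ¬ k < cap)]
    subst hk
    rcases hinv with ⟨h1, _, _⟩ | ⟨h1, h2, h3⟩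
    · omega
    · obtain ⟨t', ht'⟩ := List.head?_eq_some_iff.mp h3
      have hmem : bo ∈ R.filter (fun o => decide (k ≤ pvL text index k o)) := by
        rw [ht']; exact List.mem_cons_self
      rw [List.mem_filter] at hmem
      have hge : k ≤ pvMax (pvL text index k) R := by
        have := pvMax_ge (pvL text index k) R bo hmem.1
        have := of_decide_eq_true hmem.2
        omega
      have hub : pvMax (pvL text index k) R ≤ k := by
        apply pvMax_le _ _ _ (by omega)
        intro o _
        have hb := pvAWhile_le_bound text index o k 0
        simp only [pvL]
        omega
      have hMcap : pvMax (pvL text index k) R = k := by omega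
      rw [if_pos (by omega), hMcap, find?_eq_head?_filter, h3]
      simp [h2]
  | succ n ihn =>
    intro k bo bl hn hk0 hkc hinv
    have hklt : k < cap := by omega
    rw [pvBLoop, dif_pos hklt]
    rw [filter_step text index cap R hR k hk0 hklt hlen]
    rcases hE : R.filter (fun o => decide (k + 1 ≤ pvL text index cap o)) with _ | ⟨a, rest⟩
    · -- no survivor of round k: every offset has length ≤ k
      show (bo, bl) = _
      have hall : ∀ o ∈ R, pvL text index cap o ≤ k := by
        intro o ho
        have := List.filter_eq_nil_iff.mp hE o ho
        simp at this
        omega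
      have hMle : pvMax (pvL text index cap) R ≤ k := pvMax_le _ _ _ hk0 hall
      rcases hinv with ⟨h1, h2, h3⟩ | ⟨h1, h2, h3⟩
      · subst h1 h2 h3
        have h0 := pvMax_nonneg (pvL text index cap) R
        rw [if_neg (by omega)]
      · have hne := List.head?_eq_some_iff.mp h3
        obtain ⟨t', ht'⟩ := hne
        have hmem : bo ∈ R.filter (fun o => decide (k ≤ pvL text index cap o)) := by
          rw [ht']; exact List.mem_cons_self
        rw [List.mem_filter] at hmem
        have hge : k ≤ pvMax (pvL text index cap) R := by
          have := pvMax_ge (pvL text index cap) R bo hmem.1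
          have := of_decide_eq_true hmem.2
          omega
        have hMk : pvMax (pvL text index cap) R = k := by omega
        rw [if_pos (by omega), hMk, find?_eq_head?_filter, h3]
        simp [h2]
    · -- a :: rest survive: continue with best (a, k+1)
      show pvBLoop text index cap (a :: rest) (k + 1) a (k + 1) = _
      rw [← hE]
      exact ihn (k + 1) a (k + 1) (by omega) (by omega) (by omega)
        (Or.inr ⟨by omega, rfl, by rw [hE]; rfl⟩)

-- ===== VERDICT (by name: the statement is the Claim_ definition above) =====
theorem find_max_repetition_spec : Claim_equal_find_max_repetition := by
  intro text index window_length max_rep_length _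
  unfold Spec_find_max_repetition find_max_repetition find_max_repetition_alt
  simp only
  set cap := min max_rep_length (PySem.Str.len text - index) with hcap
  set R := PySem.List.pyRange 1 (min (index + 1) window_length) 1 with hRdef
  set L : Int → Int := pvL text index cap with hLdef
  have hfoldA := foldA_char L R 0 0 le_rfl
  have hAeq : (R.foldl
      (fun (st : Int × Int) offset =>
        if st.1 < pvAWhile text index offset cap 0 then (pvAWhile text index offset cap 0, offset) else st)
      (0, 0))
      = if 0 < pvMax L R then
          (pvMax L R, (R.find? (fun o => decide (pvMax L R ≤ L o))).getD 0)
        else (0, 0) := by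
    rw [← hfoldA]; rfl
  by_cases hc : 0 < cap
  · -- in-range facts
    have hlen : index + cap ≤ (text.toList.length : Int) := by
      have := PySem.Str.len_eq text
      omega
    have hR : ∀ o ∈ R, 1 ≤ o ∧ o ≤ index := by
      intro o ho
      rw [hRdef, PySem.List.mem_pyRange_one] at ho
      omega
    have hfilt : R.filter (fun o => decide ((0 : Int) ≤ L o)) = R := by
      apply List.filter_eq_self.mpr
      intro o _
      have := pvAWhile_le text index o cap 0
      simp only [hLdef, pvL]
      simp
      omega
    have hB := pvBLoop_eq text index cap R hc hlen hR (cap - 0).toNat 0 0 0 rfl le_rfl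
      (by omega) (Or.inl ⟨rfl, rfl, rfl⟩)
    rw [hfilt] at hB
    rw [hAeq, hB]
    by_cases hM : 0 < pvMax L R
    · rw [if_pos hM, if_pos hM]
    · rw [if_neg hM, if_neg hM]
  · -- cap ≤ 0: every match length is 0, both sides return [0, 0]
    have hL0 : ∀ o, L o = 0 := by
      intro o
      simp only [hLdef, pvL]
      rw [pvAWhile, dif_neg (by omega : ¬ ((0:Int) < cap ∧ _))]
    have hM0 : pvMax L R = 0 := by
      have h1 := pvMax_nonneg L R
      have h2 := pvMax_le L R 0 le_rfl (fun o _ => le_of_eq (hL0 o))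
      omega
    rw [hAeq, hM0, if_neg (by omega)]
    rw [pvBLoop, dif_neg (by omega : ¬ (0:Int) < cap)]
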